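-- pv_equiv track=rewrite | github.com/Kris465/MemoryBox | block11/task12.py | fill_divisible_by_13_or_17
-- ===== SOURCE A (Python) =====
-- def fill_divisible_by_13_or_17(limit, count):
--     divisible_numbers = []
--     num = limit
--
--     while len(divisible_numbers) < count:
--         if num % 13 == 0 or num % 17 == 0:
--             divisible_numbers.append(num)
--         num += 1
--
--     return divisible_numbers
-- ===== SOURCE B (Python) =====
-- def fill_divisible_by_13_or_17(limit, count):
--     divisible_numbers = []
--     num = limit
--     while len(divisible_numbers) < count:
--         gap = min(-num % 13, -num % 17)
--         num += gap
--         divisible_numbers.append(num)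
--         num += 1
--     return divisible_numbers
-- ===== Notes on version B (the rewrite author's own statement) =====
-- stated objective: faster
-- what changed: Instead of testing every integer one by one, B computes the distance to the next multiple of 13 or 17 arithmetically (min of the two negative-mod gaps) and jumps straight to it, so each loop iteration emits one output element.
import Mathlib
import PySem

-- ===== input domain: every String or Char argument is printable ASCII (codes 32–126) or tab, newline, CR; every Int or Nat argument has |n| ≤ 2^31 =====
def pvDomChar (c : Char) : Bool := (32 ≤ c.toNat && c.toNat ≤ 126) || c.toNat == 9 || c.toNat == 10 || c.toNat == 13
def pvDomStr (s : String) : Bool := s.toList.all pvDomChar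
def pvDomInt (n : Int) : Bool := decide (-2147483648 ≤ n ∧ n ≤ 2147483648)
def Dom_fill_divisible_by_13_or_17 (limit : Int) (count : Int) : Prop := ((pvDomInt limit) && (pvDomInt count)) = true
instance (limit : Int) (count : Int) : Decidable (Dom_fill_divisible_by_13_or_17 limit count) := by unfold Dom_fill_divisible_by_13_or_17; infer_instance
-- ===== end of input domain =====

-- B replaces A's one-by-one scan by arithmetically jumping to the next multiple of 13 or 17 (objective: faster, constant factor).


-- ===== PORT A =====
-- A's while loop, step for step: test each num in turn; append it if divisible by 13 or 17; num += 1.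
-- 'fuel' is ONLY a totality device (one unit per loop iteration, never exhausted on the actual call):
-- the loop performs at most 13 iterations per element still to produce, so count.toNat * 13 + 13 units suffice
-- (proved in fillFuelA_enough below); the loop body and its branches are exactly A's.
def fillGoA (count : Int) : Nat → Int → List Int → List Int
  | 0, _, acc => acc
  | fuel + 1, num, acc =>
    if (acc.length : Int) < count then
      if PySem.Int.mod num 13 == 0 || PySem.Int.mod num 17 == 0 then
        fillGoA count fuel (num + 1) (acc ++ [num])
      else
        fillGoA count fuel (num + 1) acc
    else acc

def fill_divisible_by_13_or_17 (limit : Int) (count : Int) : List Int :=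
  fillGoA count (count.toNat * 13 + 13) limit []

-- ===== PORT B =====
-- B's while loop: jump by gap = min(-num % 13, -num % 17) to the next number divisible by 13 or 17,
-- append it, continue just after it. Each iteration appends exactly one element, so the loop runs
-- exactly (count - len(acc)) times: that count is the structural recursion parameter.
def fillGoB (count : Int) : Nat → Int → List Int → List Int
  | 0, _, acc => acc
  | n + 1, num, acc =>
    let gap := min (PySem.Int.mod (-num) 13) (PySem.Int.mod (-num) 17)
    fillGoB count n (num + gap + 1) (acc ++ [num + gap])

def fill_divisible_by_13_or_17_alt (limit : Int) (count : Int) : List Int :=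
  fillGoB count count.toNat limit []

-- ===== PRECONDITION & SPEC =====
def Spec_fill_divisible_by_13_or_17 (limit : Int) (count : Int) (out : List Int) : Prop := out = fill_divisible_by_13_or_17_alt limit count
instance (limit : Int) (count : Int) (out : List Int) : Decidable (Spec_fill_divisible_by_13_or_17 limit count out) := by unfold Spec_fill_divisible_by_13_or_17; infer_instance

-- ===== CLAIM (what is proved, stated in full; the proofs are below) =====
def Claim_equal_fill_divisible_by_13_or_17 : Prop := ∀ (limit : Int) (count : Int), Dom_fill_divisible_by_13_or_17 limit count → Spec_fill_divisible_by_13_or_17 limit count (fill_divisible_by_13_or_17 limit count)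

-- ===== LEMMAS AND PROOFS =====

-- Scanning lemma: from num, A's loop skips the g non-divisible numbers and appends num + g,
-- where g is exactly B's computed gap; each loop iteration consumes one unit of fuel.
theorem fillGoA_scan (count : Int) : ∀ (g : Nat) (fuel : Nat) (num : Int) (acc : List Int),
    (acc.length : Int) < count →
    (g : Int) = min (PySem.Int.mod (-num) 13) (PySem.Int.mod (-num) 17) →
    g < fuel →
    fillGoA count fuel num acc = fillGoA count (fuel - (g + 1)) (num + g + 1) (acc ++ [num + g]) := by
  intro g
  induction g with
  | zero =>
    intro fuel num acc hlt hg hf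
    obtain ⟨f, rfl⟩ : ∃ f, fuel = f + 1 := ⟨fuel - 1, by omega⟩
    have hm13 := PySem.Int.mod_eq_emod_of_pos (a := num) (b := 13) (by omega)
    have hm17 := PySem.Int.mod_eq_emod_of_pos (a := num) (b := 17) (by omega)
    rw [PySem.Int.mod_eq_emod_of_pos (a := -num) (b := 13) (by omega),
        PySem.Int.mod_eq_emod_of_pos (a := -num) (b := 17) (by omega)] at hg
    have hdvd : PySem.Int.mod num 13 == 0 || PySem.Int.mod num 17 == 0 := by
      simp only [Bool.or_eq_true, beq_iff_eq, hm13, hm17]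
      omega
    rw [fillGoA, if_pos hlt, if_pos hdvd]
    norm_num
  | succ g ih =>
    intro fuel num acc hlt hg hf
    obtain ⟨f, rfl⟩ : ∃ f, fuel = f + 1 := ⟨fuel - 1, by omega⟩
    have hm13 := PySem.Int.mod_eq_emod_of_pos (a := num) (b := 13) (by omega)
    have hm17 := PySem.Int.mod_eq_emod_of_pos (a := num) (b := 17) (by omega)
    have h13 := PySem.Int.mod_eq_emod_of_pos (a := -num) (b := 13) (by omega)
    have h17 := PySem.Int.mod_eq_emod_of_pos (a := -num) (b := 17) (by omega)
    rw [h13, h17] at hg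
    have hpos13 : 0 < (-num) % 13 := by push_cast at hg; omega
    have hpos17 : 0 < (-num) % 17 := by push_cast at hg; omega
    have hnd : ¬ (PySem.Int.mod num 13 == 0 || PySem.Int.mod num 17 == 0) = true := by
      simp only [Bool.or_eq_true, beq_iff_eq, hm13, hm17]
      omega
    rw [fillGoA, if_pos hlt, if_neg hnd]
    have hg' : ((g : Nat) : Int) = min (PySem.Int.mod (-(num+1)) 13) (PySem.Int.mod (-(num+1)) 17) := by
      rw [PySem.Int.mod_eq_emod_of_pos (a := -(num+1)) (b := 13) (by omega),
          PySem.Int.mod_eq_emod_of_pos (a := -(num+1)) (b := 17) (by omega)]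
      have e13 : (-(num+1)) % 13 = (-num) % 13 - 1 := by omega
      have e17 : (-(num+1)) % 17 = (-num) % 17 - 1 := by omega
      rw [e13, e17]
      push_cast at hg ⊢
      omega
    rw [ih f (num + 1) acc hlt hg' (by omega)]
    have e1 : num + 1 + (g : Int) = num + ((g + 1 : Nat) : Int) := by push_cast; ring
    have e2 : f - (g + 1) = f + 1 - (g + 1 + 1) := by omega
    simp only [e1, e2]

-- Main loop equivalence, by induction on the number of elements still to produce;
-- 13 units of A-fuel per element suffice since each gap is at most 12.
theorem fillGoA_eq_fillGoB (count : Int) : ∀ (n : Nat) (fuel : Nat) (num : Int) (acc : List Int),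
    n = (count - acc.length).toNat →
    13 * n ≤ fuel →
    fillGoA count fuel num acc = fillGoB count n num acc := by
  intro n
  induction n with
  | zero =>
    intro fuel num acc hn _
    have hge : ¬ ((acc.length : Int) < count) := by omega
    cases fuel with
    | zero => rw [fillGoA, fillGoB]
    | succ f => rw [fillGoA, if_neg hge, fillGoB]
  | succ n ih =>
    intro fuel num acc hn hfuel
    have hlt : (acc.length : Int) < count := by omega
    have h13 := PySem.Int.mod_eq_emod_of_pos (a := -num) (b := 13) (by omega)
    have h17 := PySem.Int.mod_eq_emod_of_pos (a := -num) (b := 17) (by omega)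
    have hb13 : 0 ≤ (-num) % 13 ∧ (-num) % 13 < 13 := ⟨Int.emod_nonneg _ (by omega), Int.emod_lt_of_pos _ (by omega)⟩
    have hb17 : 0 ≤ (-num) % 17 ∧ (-num) % 17 < 17 := ⟨Int.emod_nonneg _ (by omega), Int.emod_lt_of_pos _ (by omega)⟩
    obtain ⟨g, hg⟩ : ∃ g : Nat, (g : Int) = min (PySem.Int.mod (-num) 13) (PySem.Int.mod (-num) 17) :=
      ⟨(min (PySem.Int.mod (-num) 13) (PySem.Int.mod (-num) 17)).toNat, by rw [h13, h17]; omega⟩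
    have hg12 : g ≤ 12 := by rw [h13, h17] at hg; omega
    calc fillGoA count fuel num acc
        = fillGoA count (fuel - (g + 1)) (num + g + 1) (acc ++ [num + g]) :=
          fillGoA_scan count g fuel num acc hlt hg (by omega)
      _ = fillGoB count n (num + g + 1) (acc ++ [num + g]) :=
          ih (fuel - (g + 1)) (num + g + 1) (acc ++ [num + g]) (by simp; omega) (by omega)
      _ = fillGoB count (n + 1) num acc := by
          rw [fillGoB]
          simp only [← hg]

-- The fuel passed by the A-side entry point covers the whole loop.
theorem fillFuelA_enough (count : Int) : 13 * count.toNat ≤ count.toNat * 13 + 13 := by omega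

-- ===== VERDICT (by name: the statement is the Claim_ definition above) =====
theorem fill_divisible_by_13_or_17_spec : Claim_equal_fill_divisible_by_13_or_17 := by
  intro limit count _
  unfold Spec_fill_divisible_by_13_or_17 fill_divisible_by_13_or_17 fill_divisible_by_13_or_17_alt
  exact fillGoA_eq_fillGoB count count.toNat _ limit [] (by simp) (fillFuelA_enough count)
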